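-- pv_equiv track=rewrite | github.com/EOH0/Git-python | FINAL/20_05.py | generate_numbers_with_rule
-- ===== SOURCE A (Python) =====
-- def generate_numbers_with_rule(l, r):
--     numbers = [5]  # 시작값
--     idx = 0
--     result = []
--
--     while True:
--         current = numbers[idx]  # 현재 숫자
--         # 새로 생성할 숫자
--         next1 = current * 10  # 끝에 0을 추가
--         next2 = current * 10 + 5  # 끝에 5를 추가
--
--         # 범위를 벗어나면 중단
--         if next1 > r and next2 > r:
--             break
--
--         # 범위 안에 들어오는 숫자만 추가
--         if next1 <= r:
--             numbers.append(next1)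
--         if next2 <= r:
--             numbers.append(next2)
--
--         idx += 1  # 다음 숫자로 이동
--
--     # 최종적으로 l 이상 r 이하인 숫자만 필터링
--     for num in numbers:
--         if l <= num <= r:
--             result.append(num)
--
--     return result
-- ===== SOURCE B (Python) =====
-- def generate_numbers_with_rule(l, r):
--     # The valid numbers (a digit 5 followed by digits 0/5) are exactly the
--     # binary numerals of 1, 2, 3, ... reread in base 10 with digit 1 -> 5
--     # (1 -> 5, 10 -> 50, 11 -> 55, 100 -> 500, ...), and this map is strictly
--     # increasing, so counting m upward enumerates them in increasing order.
--     def to_fives(m):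
--         v, p = 0, 1
--         while m:
--             v += 5 * (m & 1) * p
--             m >>= 1
--             p *= 10
--         return v
--
--     out = []
--     m = 1
--     while True:
--         v = to_fives(m)
--         if v > r:
--             break
--         if v >= l:
--             out.append(v)
--         m += 1
--     return out
-- ===== Notes on version B (the rewrite author's own statement) =====
-- stated objective: alternative
-- what changed: Replaces A's BFS queue (growing list with a manual index and in-loop break) by a closed-form bijection: the k-th valid number is the binary numeral of k reread in base 10 with digit 1 mapped to 5, so B simply counts m = 1, 2, 3, ... and emits to_fives(m) while it stays <= r, filtering by l on the fly; no queue, no tree generation, no sort.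
import Mathlib
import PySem

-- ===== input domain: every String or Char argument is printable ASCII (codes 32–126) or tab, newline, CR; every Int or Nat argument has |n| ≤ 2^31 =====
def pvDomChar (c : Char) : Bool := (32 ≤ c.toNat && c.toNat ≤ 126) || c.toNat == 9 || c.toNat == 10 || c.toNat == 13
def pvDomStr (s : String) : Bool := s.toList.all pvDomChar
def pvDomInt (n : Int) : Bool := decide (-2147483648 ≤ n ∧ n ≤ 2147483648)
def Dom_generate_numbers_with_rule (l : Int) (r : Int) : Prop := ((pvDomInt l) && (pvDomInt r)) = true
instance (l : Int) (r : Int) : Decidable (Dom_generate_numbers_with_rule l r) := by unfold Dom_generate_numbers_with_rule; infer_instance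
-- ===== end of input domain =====

-- B replaces A's BFS queue by counting m = 1, 2, ... and rereading m's binary
-- numeral in base 10 with digit 1 -> 5; objective: alternative (not faster).

-- ===== PORT A =====
-- A's `while True` loop over the growing `numbers` list with index idx.
-- The fuel only makes the recursion total; 4096 is never exhausted on Dom
-- (proved via pvBfs below), and running out would only stop the loop early.
def pvALoop (r : Int) : Nat → List Int → Nat → List Int
  | 0, numbers, _ => numbers
  | fuel+1, numbers, idx =>
    match PySem.List.pyGet? numbers (idx : Int) with
    | none => numbers          -- IndexError: unreachable (queue never exhausts before the break)
    | some current =>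
      let next1 := current * 10
      let next2 := current * 10 + 5
      if next1 > r ∧ next2 > r then numbers
      else
        let numbers1 := if next1 ≤ r then numbers ++ [next1] else numbers
        let numbers2 := if next2 ≤ r then numbers1 ++ [next2] else numbers1
        pvALoop r fuel numbers2 (idx + 1)

def generate_numbers_with_rule (l : Int) (r : Int) : List Int :=
  let numbers := pvALoop r 4096 [5] 0
  numbers.foldl (fun result num => if l ≤ num ∧ num ≤ r then result ++ [num] else result) []

-- ===== PORT B =====
-- Source B's inner `while m:` loop of to_fives, with its two accumulators v, p.
def pvToFives (m : Nat) (v : Int) (p : Int) : Int :=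
  if m = 0 then v else pvToFives (m / 2) (v + 5 * (m % 2 : Nat) * p) (p * 10)
termination_by m
decreasing_by exact Nat.div_lt_self (Nat.pos_of_ne_zero (by assumption)) (by norm_num)

-- Source B's outer `while True:` loop; the fuel only makes the recursion total:
-- 4096 is never exhausted on Dom (the loop breaks at m ≤ 2048, proved below).
def pvBMain (l r : Int) : Nat → Nat → List Int → List Int
  | 0, _, out => out
  | fuel+1, m, out =>
    let v := pvToFives m 0 1
    if v > r then out
    else pvBMain l r fuel (m + 1) (if l ≤ v then out ++ [v] else out)

def generate_numbers_with_rule_alt (l : Int) (r : Int) : List Int :=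
  pvBMain l r 4096 1 []

-- ===== PRECONDITION & SPEC =====
def Spec_generate_numbers_with_rule (l : Int) (r : Int) (out : List Int) : Prop := out = generate_numbers_with_rule_alt l r
instance (l : Int) (r : Int) (out : List Int) : Decidable (Spec_generate_numbers_with_rule l r out) := by unfold Spec_generate_numbers_with_rule; infer_instance

-- ===== CLAIM (what is proved, stated in full; the proofs are below) =====
def Claim_equal_generate_numbers_with_rule : Prop := ∀ (l : Int) (r : Int), Dom_generate_numbers_with_rule l r → Spec_generate_numbers_with_rule l r (generate_numbers_with_rule l r)

-- ===== LEMMAS AND PROOFS =====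

-- ---------- A-side: the queue loop as a level-by-level expansion ----------

-- children of one queue element, in A's emission order
def pvCh (r c : Int) : List Int :=
  (if c * 10 ≤ r then [c * 10] else []) ++ (if c * 10 + 5 ≤ r then [c * 10 + 5] else [])

def pvChL (r : Int) (L : List Int) : List Int := L.flatMap (pvCh r)

-- A's loop seen as a pure queue process (emitted suffix only)
def pvBfs (r : Int) : Nat → List Int → List Int
  | _, [] => []
  | 0, _ :: _ => []
  | fuel+1, c :: Q =>
    if c * 10 > r ∧ c * 10 + 5 > r then []
    else pvCh r c ++ pvBfs r fuel (Q ++ pvCh r c)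

-- level-by-level expansion
def pvLvls (r : Int) : Nat → List Int → List Int
  | 0, _ => []
  | n+1, L => if L = [] then [] else L ++ pvLvls r n (pvChL r L)

theorem pvLvls_nil (r : Int) (n : Nat) : pvLvls r n [] = [] := by cases n <;> rfl

theorem pvMem_ch {r c a : Int} (h : a ∈ pvCh r c) : (a = c * 10 ∨ a = c * 10 + 5) ∧ a ≤ r := by
  unfold pvCh at h
  split_ifs at h <;> simp_all
  omega

theorem pvCh_nil {r c : Int} (h : c * 10 > r) : pvCh r c = [] := by
  unfold pvCh
  have h2 : ¬ (c * 10 ≤ r) := by omega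
  have h3 : ¬ (c * 10 + 5 ≤ r) := by omega
  simp [h2, h3]

theorem pvBfs_nil (r : Int) (fuel : Nat) : pvBfs r fuel [] = [] := by
  cases fuel <;> rfl

theorem pvBfs_dead {r : Int} {Q : List Int} (h : ∀ y ∈ Q, y * 10 > r) (fuel : Nat) :
    pvBfs r fuel Q = [] := by
  cases fuel with
  | zero => cases Q <;> rfl
  | succ f =>
    cases Q with
    | nil => rfl
    | cons c Q' =>
      have hc := h c (by simp)
      simp [pvBfs, hc]
      omega

theorem pvALoop_bridge (r : Int) : ∀ (fuel : Nat) (numbers : List Int) (idx : Nat),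
    idx ≤ numbers.length →
    pvALoop r fuel numbers idx = numbers ++ pvBfs r fuel (numbers.drop idx) := by
  intro fuel
  induction fuel with
  | zero => intro numbers idx _; cases numbers.drop idx <;> simp [pvALoop, pvBfs]
  | succ f ih =>
    intro numbers idx hidx
    rw [pvALoop]
    rw [PySem.List.pyGet?_natCast]
    rcases hQ : numbers.drop idx with _ | ⟨c, Q'⟩
    · have : numbers[idx]? = none := by
        rw [← List.head?_drop, hQ]; rfl
      rw [this]
      simp [pvBfs_nil]
    · have hlt : idx < numbers.length := by
        by_contra h
        have : numbers.drop idx = [] := List.drop_eq_nil_of_le (by omega)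
        simp [this] at hQ
      have hget : numbers[idx]? = some c := by
        rw [← List.head?_drop, hQ]; rfl
      rw [hget]
      simp only []
      by_cases hbr : c * 10 > r ∧ c * 10 + 5 > r
      · rw [if_pos hbr, pvBfs, if_pos hbr, List.append_nil]
      · rw [if_neg hbr, pvBfs, if_neg hbr]
        have hle : c * 10 ≤ r := by omega
        have hnum2 : (if c * 10 + 5 ≤ r then
              (if c * 10 ≤ r then numbers ++ [c * 10] else numbers) ++ [c * 10 + 5]
            else (if c * 10 ≤ r then numbers ++ [c * 10] else numbers))
            = numbers ++ pvCh r c := by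
          unfold pvCh
          split_ifs <;> simp_all
        rw [hnum2]
        rw [ih (numbers ++ pvCh r c) (idx + 1) (by simp; omega)]
        have hdrop : (numbers ++ pvCh r c).drop (idx + 1) = Q' ++ pvCh r c := by
          rw [List.drop_append_of_le_length (by omega)]
          have : numbers.drop (idx + 1) = Q' := by
            rw [← List.drop_drop, hQ]; rfl
          rw [this]
        rw [hdrop, List.append_assoc]

-- consume exactly the current level's remainder X; C holds already-emitted children
theorem pvKeyInner (r : Int) (k : Nat) : ∀ (X : List Int),
    X.Pairwise (· < ·) →
    (∀ x ∈ X, 5 * 10 ^ k ≤ x ∧ x < 10 ^ (k + 1)) →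
    ∀ (C : List Int) (f : Nat), (∀ x ∈ X, ∀ y ∈ C, x < y) →
    pvBfs r (X.length + f) (X ++ C) = pvChL r X ++ pvBfs r f (C ++ pvChL r X) := by
  intro X
  induction X with
  | nil => intro _ _ C f _; simp [pvChL]
  | cons c X' ih =>
    intro hpw hb C f hXC
    have hpw' : X'.Pairwise (· < ·) := hpw.of_cons
    have hcX' : ∀ y ∈ X', c < y := by
      intro y hy; exact (List.pairwise_cons.mp hpw).1 y hy
    have hbc := hb c (by simp)
    have hchL_cons : pvChL r (c :: X') = pvCh r c ++ pvChL r X' := by simp [pvChL]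
    by_cases hbr : c * 10 > r
    · -- break: everything after c is dead too
      have hbfs : pvBfs r (List.length (c :: X') + f) ((c :: X') ++ C) = [] := by
        apply pvBfs_dead
        intro y hy
        simp at hy
        rcases hy with h | h | h
        · omega
        · have := hcX' y h; omega
        · have := hXC c (by simp) y h; omega
      rw [hbfs]
      have hch : pvChL r (c :: X') = [] := by
        simp only [pvChL, List.flatMap_eq_nil_iff]
        intro y hy
        apply pvCh_nil
        simp at hy
        rcases hy with h | h
        · omega
        · have := hcX' y h; omega
      rw [hch]
      simp only [List.append_nil, List.nil_append]
      rw [pvBfs_dead _ f]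
      intro y hy
      have := hXC c (by simp) y hy; omega
    · -- process c, then the rest by the induction hypothesis
      have hstep : pvBfs r (List.length (c :: X') + f) ((c :: X') ++ C)
          = pvCh r c ++ pvBfs r (X'.length + f) ((X' ++ C) ++ pvCh r c) := by
        have hlen : List.length (c :: X') + f = (X'.length + f) + 1 := by simp; omega
        rw [hlen]
        show pvBfs r ((X'.length + f) + 1) (c :: (X' ++ C)) = _
        rw [pvBfs]
        have : ¬ (c * 10 > r ∧ c * 10 + 5 > r) := by omega
        rw [if_neg this]
      rw [hstep, List.append_assoc]
      have hb' : ∀ x ∈ X', 5 * 10 ^ k ≤ x ∧ x < 10 ^ (k + 1) := fun x hx => hb x (by simp [hx])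
      have hXC' : ∀ x ∈ X', ∀ y ∈ C ++ pvCh r c, x < y := by
        intro x hx y hy
        rcases List.mem_append.mp hy with h | h
        · exact hXC x (by simp [hx]) y h
        · have hy' := pvMem_ch h
          have hx' := hb' x hx
          have hp : (1 : Int) ≤ 10 ^ k := one_le_pow₀ (by norm_num)
          have hps : (10 : Int) ^ (k + 1) = 10 ^ k * 10 := pow_succ 10 k
          have hcx := hcX' x hx
          omega
      rw [ih hpw' hb' (C ++ pvCh r c) f hXC']
      rw [hchL_cons]
      simp [List.append_assoc]

theorem pvLvls_lb (r : Int) : ∀ (n : Nat) (L : List Int) (b : Int), 0 ≤ b →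
    (∀ x ∈ L, b ≤ x) → ∀ v ∈ pvLvls r n L, b ≤ v := by
  intro n
  induction n with
  | zero => intro L b _ _ v hv; simp [pvLvls] at hv
  | succ m ih =>
    intro L b hb hL v hv
    rw [pvLvls] at hv
    split_ifs at hv with h
    · simp at hv
    · rcases List.mem_append.mp hv with h' | h'
      · exact hL v h'
      · refine ih (pvChL r L) b hb ?_ v h'
        intro x hx
        rcases List.mem_flatMap.mp hx with ⟨c, hcL, hc⟩
        have h1 := (pvMem_ch hc).1
        have h2 := hL c hcL
        omega

theorem pvCh_pairwise (r c : Int) : (pvCh r c).Pairwise (· < ·) := by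
  unfold pvCh
  split_ifs <;> simp

theorem pvChL_pairwise {r : Int} {L : List Int} (h : L.Pairwise (· < ·)) :
    (pvChL r L).Pairwise (· < ·) := by
  induction L with
  | nil => simp [pvChL]
  | cons c L' ih =>
    have h' : L'.Pairwise (· < ·) := h.of_cons
    have hc : ∀ y ∈ L', c < y := (List.pairwise_cons.mp h).1
    have : pvChL r (c :: L') = pvCh r c ++ pvChL r L' := by simp [pvChL]
    rw [this]
    rw [List.pairwise_append]
    refine ⟨pvCh_pairwise r c, ih h', ?_⟩
    intro a ha b hb
    rcases List.mem_flatMap.mp hb with ⟨c', hc', hbc'⟩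
    have h1 := (pvMem_ch ha).1
    have h2 := (pvMem_ch hbc').1
    have h3 := hc c' hc'
    omega

-- level invariant: strictly sorted, all in [5·10^k, 10^(k+1)), all ≤ r
def pvInvL (r : Int) (k : Nat) (L : List Int) : Prop :=
  L.Pairwise (· < ·) ∧ ∀ x ∈ L, 5 * 10 ^ k ≤ x ∧ x < 10 ^ (k + 1) ∧ x ≤ r

theorem pvInvL_chL {r : Int} {k : Nat} {L : List Int} (h : pvInvL r k L) :
    pvInvL r (k + 1) (pvChL r L) := by
  refine ⟨pvChL_pairwise h.1, ?_⟩
  intro x hx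
  rcases List.mem_flatMap.mp hx with ⟨c, hcL, hc⟩
  have h1 := pvMem_ch hc
  have h2 := h.2 c hcL
  have hps : (10 : Int) ^ (k + 1) = 10 ^ k * 10 := pow_succ 10 k
  have hps2 : (10 : Int) ^ (k + 2) = 10 ^ (k + 1) * 10 := pow_succ 10 (k + 1)
  constructor
  · omega
  constructor
  · omega
  · exact h1.2

theorem pvLvls_pairwise (r : Int) : ∀ (n : Nat) (k : Nat) (L : List Int), pvInvL r k L →
    (pvLvls r n L).Pairwise (· < ·) := by
  intro n
  induction n with
  | zero => intro k L _; simp [pvLvls]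
  | succ m ih =>
    intro k L hInv
    rw [pvLvls]
    split_ifs with h
    · simp
    · rw [List.pairwise_append]
      refine ⟨hInv.1, ih (k + 1) (pvChL r L) (pvInvL_chL hInv), ?_⟩
      intro a ha b hb
      have hbb : 5 * 10 ^ (k + 1) ≤ b := by
        refine pvLvls_lb r m (pvChL r L) (5 * 10 ^ (k + 1)) ?_ ?_ b hb
        · positivity
        · intro x hx; exact ((pvInvL_chL hInv).2 x hx).1
      have haa := hInv.2 a ha
      have hps : (10 : Int) ^ (k + 1) = 10 ^ k * 10 := pow_succ 10 k
      have hp : (1 : Int) ≤ 10 ^ k := one_le_pow₀ (by norm_num)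
      omega

theorem pvChL_length_le (r : Int) (L : List Int) : (pvChL r L).length ≤ 2 * L.length := by
  induction L with
  | nil => simp [pvChL]
  | cons c L' ih =>
    have : pvChL r (c :: L') = pvCh r c ++ pvChL r L' := by simp [pvChL]
    rw [this]
    have hc : (pvCh r c).length ≤ 2 := by unfold pvCh; split_ifs <;> simp
    rw [List.length_append, List.length_cons]
    omega

-- the queue process equals level-by-level expansion of the next level
theorem pvOuter (r : Int) : ∀ (n k : Nat) (L : List Int) (fuel : Nat),
    r < 5 * 10 ^ (k + n) → pvInvL r k L → L.length * (2 ^ n - 1) ≤ fuel →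
    pvBfs r fuel L = pvLvls r n (pvChL r L) := by
  intro n
  induction n with
  | zero =>
    intro k L fuel hr hInv _
    have hL : L = [] := by
      cases L with
      | nil => rfl
      | cons x L' =>
        have := hInv.2 x (by simp)
        simp at hr
        omega
    subst hL
    rw [pvBfs_nil]
    simp [pvLvls]
  | succ m ih =>
    intro k L fuel hr hInv hfuel
    cases L with
    | nil => rw [pvBfs_nil]; simp [pvChL, pvLvls]
    | cons c L0 =>
      set L := c :: L0 with hLdef
      have hlen1 : 1 ≤ L.length := by simp [hLdef]
      have h2pow : 1 ≤ 2 ^ (m + 1) := Nat.one_le_two_pow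
      have hfL : L.length ≤ fuel := by
        have : L.length * 1 ≤ L.length * (2 ^ (m + 1) - 1) := by
          apply Nat.mul_le_mul_left
          have : 2 ≤ 2 ^ (m + 1) := by
            calc 2 = 2 ^ 1 := rfl
            _ ≤ 2 ^ (m + 1) := Nat.pow_le_pow_right (by norm_num) (by omega)
          omega
        omega
      have hsplit : fuel = L.length + (fuel - L.length) := by omega
      rw [hsplit]
      have hKey := pvKeyInner r k L hInv.1
        (fun x hx => ⟨(hInv.2 x hx).1, (hInv.2 x hx).2.1⟩) [] (fuel - L.length)
        (by intro x _ y hy; simp at hy)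
      rw [show L ++ ([] : List Int) = L by simp] at hKey
      rw [show ([] : List Int) ++ pvChL r L = pvChL r L by simp] at hKey
      rw [hKey]
      have hInv' : pvInvL r (k + 1) (pvChL r L) := pvInvL_chL hInv
      have hrest : pvBfs r (fuel - L.length) (pvChL r L) = pvLvls r m (pvChL r (pvChL r L)) := by
        apply ih (k + 1) (pvChL r L) (fuel - L.length)
        · have : k + 1 + m = k + (m + 1) := by omega
          rw [this]; exact hr
        · exact hInv'
        · have hc2 := pvChL_length_le r L
          obtain ⟨Q, hQm⟩ : ∃ Q, 2 ^ m = Q + 1 :=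
            ⟨2 ^ m - 1, by have := Nat.one_le_two_pow (n := m); omega⟩
          have h1 : 2 ^ (m + 1) = 2 * Q + 2 := by rw [pow_succ, hQm]; ring
          have hfuel' : L.length * (2 * Q + 1) ≤ fuel := by
            rw [h1] at hfuel
            have h2 : 2 * Q + 2 - 1 = 2 * Q + 1 := by omega
            rw [h2] at hfuel
            exact hfuel
          calc (pvChL r L).length * (2 ^ m - 1) = (pvChL r L).length * Q := by
                rw [hQm]; norm_num
            _ ≤ 2 * L.length * Q := Nat.mul_le_mul_right _ hc2
            _ ≤ fuel - L.length := by
                apply Nat.le_sub_of_add_le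
                have e : 2 * L.length * Q + L.length = L.length * (2 * Q + 1) := by ring
                rw [e]; exact hfuel'
      rw [hrest]
      rw [pvLvls]
      split_ifs with h
      · rw [h]
        have hnil : pvChL r ([] : List Int) = [] := rfl
        rw [hnil, pvLvls_nil]
        rfl
      · rfl

-- ---------- B-side: the binary-reread map pvF and the counting loop ----------

-- proof-side direct recursion for to_fives
def pvF (m : Nat) : Int :=
  if m = 0 then 0 else 10 * pvF (m / 2) + 5 * (m % 2 : Nat)
termination_by m
decreasing_by exact Nat.div_lt_self (Nat.pos_of_ne_zero (by assumption)) (by norm_num)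

theorem pvF_zero : pvF 0 = 0 := by rw [pvF]; simp

theorem pvF_eq (m : Nat) (h : m ≠ 0) : pvF m = 10 * pvF (m / 2) + 5 * (m % 2 : Nat) := by
  rw [pvF]; simp [h]

theorem pvF_one : pvF 1 = 5 := by
  rw [pvF_eq 1 (by norm_num)]
  norm_num [pvF_zero]

theorem pvF_double (m : Nat) (h : m ≠ 0) : pvF (2 * m) = 10 * pvF m := by
  rw [pvF_eq (2 * m) (by omega)]
  have h1 : 2 * m / 2 = m := by omega
  have h2 : 2 * m % 2 = 0 := by omega
  rw [h1, h2]
  simp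

theorem pvF_double1 (m : Nat) : pvF (2 * m + 1) = 10 * pvF m + 5 := by
  rw [pvF_eq (2 * m + 1) (by omega)]
  have h1 : (2 * m + 1) / 2 = m := by omega
  have h2 : (2 * m + 1) % 2 = 1 := by omega
  rw [h1, h2]
  simp

theorem pvF_ge5 : ∀ m : Nat, 1 ≤ m → 5 ≤ pvF m := by
  intro m
  induction m using Nat.strong_induction_on with
  | _ m ih =>
    intro hm
    by_cases h1 : m = 1
    · rw [h1, pvF_one]
    · rw [pvF_eq m (by omega)]
      have hh : 1 ≤ m / 2 := by omega
      have := ih (m / 2) (by omega) hh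
      have : (0 : Int) ≤ (m % 2 : Nat) := by positivity
      have := ih (m / 2) (by omega) hh
      omega

theorem pvF_mono : ∀ m' m : Nat, m < m' → pvF m < pvF m' := by
  intro m'
  induction m' using Nat.strong_induction_on with
  | _ m' ih =>
    intro m hm
    have hm'1 : 1 ≤ m' := by omega
    by_cases h0 : m = 0
    · rw [h0, pvF_zero]
      have := pvF_ge5 m' hm'1
      omega
    · rw [pvF_eq m h0, pvF_eq m' (by omega)]
      by_cases hh : m / 2 < m' / 2
      · have hlt := ih (m' / 2) (by omega) (m / 2) hh
        have ha : (m % 2 : Int) ≤ 1 := by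
          have : m % 2 ≤ 1 := by omega
          exact_mod_cast this
        have hb : (0 : Int) ≤ (m' % 2 : Nat) := by positivity
        omega
      · have heq : m / 2 = m' / 2 := by omega
        rw [heq]
        have h2 : m % 2 = 0 ∧ m' % 2 = 1 := by omega
        rw [h2.1, h2.2]
        norm_num

theorem pvF_mono_le (m m' : Nat) (h : m ≤ m') : pvF m ≤ pvF m' := by
  rcases Nat.lt_or_ge m m' with h' | h'
  · exact le_of_lt (pvF_mono m' m h')
  · have : m = m' := by omega
    rw [this]

theorem pvF_pow : ∀ k : Nat, pvF (2 ^ k) = 5 * 10 ^ k := by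
  intro k
  induction k with
  | zero => simpa using pvF_one
  | succ j ih =>
    have : 2 ^ (j + 1) = 2 * 2 ^ j := by rw [pow_succ]; ring
    rw [this, pvF_double (2 ^ j) (by positivity), ih]
    ring

-- the accumulator loop computes v + p * pvF m
theorem pvToFives_eq : ∀ (m : Nat) (v p : Int), pvToFives m v p = v + p * pvF m := by
  intro m
  induction m using Nat.strong_induction_on with
  | _ m ih =>
    intro v p
    by_cases h0 : m = 0
    · rw [h0, pvToFives, pvF_zero]; simp
    · rw [pvToFives, if_neg h0, ih (m / 2) (Nat.div_lt_self (by omega) (by norm_num)),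
        pvF_eq m h0]
      ring

-- the values Source B emits before breaking, from counter m0 on
def pvEnum (r : Int) : Nat → Nat → List Int
  | 0, _ => []
  | fuel+1, m => if pvF m > r then [] else pvF m :: pvEnum r fuel (m + 1)

theorem pvBMain_eq (l r : Int) : ∀ (fuel m : Nat) (out : List Int),
    pvBMain l r fuel m out = out ++ (pvEnum r fuel m).filter (fun v => decide (l ≤ v)) := by
  intro fuel
  induction fuel with
  | zero => intro m out; simp [pvBMain, pvEnum]
  | succ f ih =>
    intro m out
    rw [pvBMain, pvEnum]
    have hv : pvToFives m 0 1 = pvF m := by rw [pvToFives_eq]; ring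
    rw [hv]
    split_ifs with h1 h2
    · simp
    · rw [ih]
      simp [h2]
    · rw [ih]
      simp [h2]

theorem pvEnum_mem_fwd (r : Int) : ∀ (fuel m0 : Nat) (v : Int), v ∈ pvEnum r fuel m0 →
    (∃ m, m0 ≤ m ∧ pvF m = v) ∧ v ≤ r := by
  intro fuel
  induction fuel with
  | zero => intro m0 v hv; simp [pvEnum] at hv
  | succ f ih =>
    intro m0 v hv
    rw [pvEnum] at hv
    split_ifs at hv with h
    · simp at hv
    · rcases List.mem_cons.mp hv with h' | h'
      · exact ⟨⟨m0, le_refl _, h'.symm⟩, by omega⟩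
      · rcases ih (m0 + 1) v h' with ⟨⟨m, hm, hfm⟩, hvr⟩
        exact ⟨⟨m, by omega, hfm⟩, hvr⟩

theorem pvEnum_mem_bwd (r : Int) : ∀ (fuel m0 : Nat),
    (∃ t, m0 ≤ t ∧ t < m0 + fuel ∧ r < pvF t) →
    ∀ (m : Nat), m0 ≤ m → pvF m ≤ r → pvF m ∈ pvEnum r fuel m0 := by
  intro fuel
  induction fuel with
  | zero =>
    intro m0 ht m hm hr
    rcases ht with ⟨t, h1, h2, _⟩
    omega
  | succ f ih =>
    intro m0 ht m hm hr
    rcases ht with ⟨t, ht1, ht2, ht3⟩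
    have hm0 : pvF m0 ≤ r := le_trans (pvF_mono_le m0 m hm) hr
    rw [pvEnum, if_neg (by omega)]
    by_cases he : m = m0
    · rw [he]; exact List.mem_cons_self
    · have htm0 : m0 < t := by
        by_contra hc
        have : pvF t ≤ pvF m0 := pvF_mono_le t m0 (by omega)
        omega
      exact List.mem_cons_of_mem _ (ih (m0 + 1) ⟨t, by omega, by omega, ht3⟩ m (by omega) hr)

theorem pvEnum_pairwise (r : Int) : ∀ (fuel m0 : Nat), (pvEnum r fuel m0).Pairwise (· < ·) := by
  intro fuel
  induction fuel with
  | zero => intro m0; simp [pvEnum]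
  | succ f ih =>
    intro m0
    rw [pvEnum]
    split_ifs with h
    · simp
    · rw [List.pairwise_cons]
      refine ⟨?_, ih (m0 + 1)⟩
      intro v hv
      rcases (pvEnum_mem_fwd r f (m0 + 1) v hv).1 with ⟨m, hm, hfm⟩
      rw [← hfm]
      exact pvF_mono m m0 (by omega)

-- ---------- membership characterisation of A's level expansion ----------

theorem pvChL_iter_nil (r : Int) : ∀ j : Nat, (pvChL r)^[j] [] = [] := by
  intro j
  induction j with
  | zero => rfl
  | succ i ih => rw [Function.iterate_succ_apply', ih]; rfl

theorem pvLvls_mem (r : Int) : ∀ (n : Nat) (L : List Int) (v : Int),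
    v ∈ pvLvls r n L ↔ ∃ j < n, v ∈ (pvChL r)^[j] L := by
  intro n
  induction n with
  | zero => intro L v; simp [pvLvls]
  | succ m ih =>
    intro L v
    rw [pvLvls]
    split_ifs with h
    · subst h
      simp [pvChL_iter_nil]
    · rw [List.mem_append, ih (pvChL r L) v]
      constructor
      · rintro (h' | ⟨j, hj, hmem⟩)
        · exact ⟨0, by omega, h'⟩
        · exact ⟨j + 1, by omega, by rwa [Function.iterate_succ_apply]⟩
      · rintro ⟨j, hj, hmem⟩
        cases j with
        | zero => exact Or.inl hmem
        | succ i =>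
          right
          exact ⟨i, by omega, by rwa [Function.iterate_succ_apply] at hmem⟩

theorem pvIt_inv (r : Int) (hr5 : 5 ≤ r) : ∀ j : Nat, pvInvL r j ((pvChL r)^[j] [5]) := by
  intro j
  induction j with
  | zero =>
    refine ⟨by simp, ?_⟩
    intro x hx
    simp at hx
    subst hx
    norm_num
    omega
  | succ i ih =>
    rw [Function.iterate_succ_apply']
    exact pvInvL_chL ih

theorem pvIt_fwd (r : Int) (hr5 : 5 ≤ r) : ∀ (j : Nat) (v : Int), v ∈ (pvChL r)^[j] [5] →
    (∃ m, 1 ≤ m ∧ pvF m = v) ∧ v ≤ r := by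
  intro j
  induction j with
  | zero =>
    intro v hv
    simp at hv
    subst hv
    exact ⟨⟨1, le_refl _, pvF_one⟩, hr5⟩
  | succ i ih =>
    intro v hv
    rw [Function.iterate_succ_apply'] at hv
    rcases List.mem_flatMap.mp hv with ⟨p, hp, hc⟩
    rcases ih p hp with ⟨⟨m, hm, hfm⟩, _⟩
    have hch := pvMem_ch hc
    refine ⟨?_, hch.2⟩
    rcases hch.1 with h | h
    · exact ⟨2 * m, by omega, by rw [pvF_double m (by omega), hfm, h]; ring⟩
    · exact ⟨2 * m + 1, by omega, by rw [pvF_double1 m, hfm, h]; ring⟩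

theorem pvIt_bwd (r : Int) (hr5 : 5 ≤ r) (hr : r ≤ 2147483648) :
    ∀ m : Nat, 1 ≤ m → pvF m ≤ r → ∃ j ≤ 9, pvF m ∈ (pvChL r)^[j] [5] := by
  intro m
  induction m using Nat.strong_induction_on with
  | _ m ih =>
    intro hm hmr
    by_cases h1 : m = 1
    · exact ⟨0, by omega, by rw [h1, pvF_one]; simp⟩
    · have hp1 : 1 ≤ m / 2 := by omega
      have hfp5 : 5 ≤ pvF (m / 2) := pvF_ge5 _ hp1
      have hmeq : pvF m = 10 * pvF (m / 2) + 5 * (m % 2 : Nat) := pvF_eq m (by omega)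
      have hm2 : (0 : Int) ≤ (m % 2 : Nat) := by positivity
      have hpr : pvF (m / 2) ≤ r := by omega
      rcases ih (m / 2) (by omega) hp1 hpr with ⟨j, hj9, hjm⟩
      -- the parent's level bound forces j + 1 ≤ 9
      have hlb : 5 * 10 ^ j ≤ pvF (m / 2) := ((pvIt_inv r hr5 j).2 _ hjm).1
      have hj8 : j ≤ 8 := by
        by_contra hc
        have h9 : (10 : Int) ^ 9 ≤ 10 ^ j := pow_le_pow_right₀ (by norm_num) (by omega)
        have : (10 : Int) ^ 9 = 1000000000 := by norm_num
        omega
      refine ⟨j + 1, by omega, ?_⟩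
      rw [Function.iterate_succ_apply']
      apply List.mem_flatMap.mpr
      refine ⟨pvF (m / 2), hjm, ?_⟩
      unfold pvCh
      rcases Nat.mod_two_eq_zero_or_one m with hpar | hpar
      · have hv : pvF m = pvF (m / 2) * 10 := by rw [hmeq, hpar]; push_cast; ring
        rw [List.mem_append]
        left
        rw [if_pos (by omega), ← hv]
        simp
      · have hv : pvF m = pvF (m / 2) * 10 + 5 := by rw [hmeq, hpar]; push_cast; ring
        rw [List.mem_append]
        right
        rw [if_pos (by omega), ← hv]
        simp

-- ===== VERDICT (by name: the statement is the Claim_ definition above) =====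
theorem generate_numbers_with_rule_spec : Claim_equal_generate_numbers_with_rule := by
  intro l r hdom
  unfold Spec_generate_numbers_with_rule
  unfold Dom_generate_numbers_with_rule pvDomInt at hdom
  simp only [Bool.and_eq_true, decide_eq_true_eq] at hdom
  have hr2 : r ≤ 2147483648 := hdom.2.2
  unfold generate_numbers_with_rule generate_numbers_with_rule_alt
  rw [pvBMain_eq]
  have hbridge : pvALoop r 4096 [5] 0 = [5] ++ pvBfs r 4096 [5] := by
    rw [pvALoop_bridge r 4096 [5] 0 (by simp)]
    rfl
  by_cases hr5 : r < 5
  · -- r < 5: A's queue dies instantly and the filter drops 5; B breaks at m = 1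
    show (pvALoop r 4096 [5] 0).foldl
        (fun result num => if l ≤ num ∧ num ≤ r then result ++ [num] else result) [] = _
    rw [hbridge]
    rw [pvBfs_dead (by intro y hy; simp at hy; omega) 4096]
    have hEnum : pvEnum r 4096 1 = [] := by
      have : (4096 : Nat) = 4095 + 1 := by norm_num
      rw [this, pvEnum, if_pos (by rw [pvF_one]; omega)]
    rw [hEnum]
    simp only [List.append_nil, List.foldl, List.filter_nil]
    have : ¬ (l ≤ 5 ∧ (5 : Int) ≤ r) := by omega
    rw [if_neg this]
  · have hr5' : (5 : Int) ≤ r := by omega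
    have hInv0 : pvInvL r 0 [5] := by
      refine ⟨by simp, ?_⟩
      intro x hx; simp at hx; subst hx
      norm_num
      omega
    have hA : pvBfs r 4096 [5] = pvLvls r 9 (pvChL r [5]) := by
      apply pvOuter r 9 0 [5] 4096
      · norm_num; omega
      · exact hInv0
      · norm_num
    set V : List Int := [5] ++ pvLvls r 9 (pvChL r [5]) with hV
    set F : List Int := pvEnum r 4096 1 with hF
    -- membership in V: exactly the pvF-values ≤ r
    have hVmem : ∀ v : Int, v ∈ V ↔ (∃ m, 1 ≤ m ∧ pvF m = v) ∧ v ≤ r := by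
      intro v
      constructor
      · intro hv
        rcases List.mem_append.mp hv with h | h
        · simp at h; subst h
          exact ⟨⟨1, le_refl _, pvF_one⟩, hr5'⟩
        · rcases (pvLvls_mem r 9 (pvChL r [5]) v).mp h with ⟨j, hj, hmem⟩
          have : v ∈ (pvChL r)^[j + 1] [5] := by
            rwa [Function.iterate_succ_apply]
          exact pvIt_fwd r hr5' (j + 1) v this
      · rintro ⟨⟨m, hm, hfm⟩, hvr⟩
        rcases pvIt_bwd r hr5' hr2 m hm (by omega) with ⟨j, hj, hjm⟩
        rw [← hfm]
        cases j with
        | zero =>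
          simp at hjm
          rw [hjm]
          exact List.mem_append.mpr (Or.inl (by simp))
        | succ i =>
          apply List.mem_append.mpr
          right
          apply (pvLvls_mem r 9 (pvChL r [5]) (pvF m)).mpr
          exact ⟨i, by omega, by rwa [Function.iterate_succ_apply] at hjm⟩
    -- membership in F: the same set
    have hFmem : ∀ v : Int, v ∈ F ↔ (∃ m, 1 ≤ m ∧ pvF m = v) ∧ v ≤ r := by
      intro v
      constructor
      · exact pvEnum_mem_fwd r 4096 1 v
      · rintro ⟨⟨m, hm, hfm⟩, hvr⟩
        rw [← hfm]
        apply pvEnum_mem_bwd r 4096 1 ?_ m hm (by omega)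
        refine ⟨2048, by norm_num, by norm_num, ?_⟩
        have : (2048 : Nat) = 2 ^ 11 := by norm_num
        rw [this, pvF_pow]
        norm_num
        omega
    -- both are strictly increasing
    have hVpw : V.Pairwise (· < ·) := by
      rw [hV, List.pairwise_append]
      refine ⟨by simp, pvLvls_pairwise r 9 1 (pvChL r [5]) (pvInvL_chL hInv0), ?_⟩
      intro a ha b hb
      simp at ha; subst ha
      have : (5 : Int) * 10 ^ 1 ≤ b := by
        refine pvLvls_lb r 9 (pvChL r [5]) (5 * 10 ^ 1) (by norm_num) ?_ b hb
        intro x hx; exact ((pvInvL_chL hInv0).2 x hx).1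
      norm_num at this
      omega
    have hFpw : F.Pairwise (· < ·) := pvEnum_pairwise r 4096 1
    -- hence equal as lists
    have hVF : V = F := by
      have hperm : V.Perm F :=
        (List.perm_ext_iff_of_nodup (hVpw.imp ne_of_lt) (hFpw.imp ne_of_lt)).mpr
          (fun v => (hVmem v).trans (hFmem v).symm)
      exact List.Perm.eq_of_pairwise (fun a b _ _ h1 h2 => le_antisymm h1 h2)
        (List.Pairwise.imp le_of_lt hVpw) (List.Pairwise.imp le_of_lt hFpw) hperm
    -- A's fold is a filter; its two-sided test collapses since every v ∈ V is ≤ r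
    show (pvALoop r 4096 [5] 0).foldl
        (fun result num => if l ≤ num ∧ num ≤ r then result ++ [num] else result) [] = _
    rw [hbridge, hA]
    rw [PySem.List.foldl_append_ite_eq_filter]
    simp only [List.nil_append]
    rw [show ([5] ++ pvLvls r 9 (pvChL r [5])) = V from rfl, hVF]
    apply List.filter_congr
    intro v hv
    have hvr : v ≤ r := ((hFmem v).mp hv).2
    by_cases hl : l ≤ v <;> simp [hl, hvr]
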